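-- pv_equiv track=rewrite | github.com/PeraZver/NOB-RAG | source/rag/rag_utils.py | format_page_citation
-- ===== SOURCE A (Python) =====
-- def format_page_citation(pages: list[int]) -> str:
--     if not pages:
--         return "page unknown"
--
--     ranges: list[tuple[int, int]] = []
--     start = pages[0]
--     end = pages[0]
--
--     for page in pages[1:]:
--         if page == end + 1:
--             end = page
--             continue
--         ranges.append((start, end))
--         start = page
--         end = page
--     ranges.append((start, end))
--
--     labels = [
--         f"{range_start}-{range_end}" if range_start != range_end else str(range_start)
--         for range_start, range_end in ranges
--     ]
--     prefix = "pp." if len(labels) > 1 or ranges[0][0] != ranges[0][1] else "p."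
--     return f"{prefix} {', '.join(labels)}"
-- ===== SOURCE B (Python) =====
-- def format_page_citation(pages: list[int]) -> str:
--     if not pages:
--         return "page unknown"
--     n = len(pages)
--     # staged passes: 1) break indices, 2) cut points, 3) ranges by pairing cuts
--     cuts = [0] + [k for k in range(1, n) if pages[k] != pages[k - 1] + 1] + [n]
--     ranges = [(pages[a], pages[b - 1]) for a, b in zip(cuts, cuts[1:])]
--     labels = [str(s) if s == e else f"{s}-{e}" for s, e in ranges]
--     prefix = "p." if len(ranges) == 1 and ranges[0][0] == ranges[0][1] else "pp."
--     return f"{prefix} {', '.join(labels)}"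
-- ===== Notes on version B (the rewrite author's own statement) =====
-- stated objective: alternative
-- what changed: Replaced A's stateful accumulator loop (mutable start/end with incremental appends) by a staged declarative pipeline: first compute the list of break indices with a comprehension over adjacent pairs, then form cut points and derive the ranges by zipping consecutive cut points and indexing into the list.
import Mathlib
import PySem

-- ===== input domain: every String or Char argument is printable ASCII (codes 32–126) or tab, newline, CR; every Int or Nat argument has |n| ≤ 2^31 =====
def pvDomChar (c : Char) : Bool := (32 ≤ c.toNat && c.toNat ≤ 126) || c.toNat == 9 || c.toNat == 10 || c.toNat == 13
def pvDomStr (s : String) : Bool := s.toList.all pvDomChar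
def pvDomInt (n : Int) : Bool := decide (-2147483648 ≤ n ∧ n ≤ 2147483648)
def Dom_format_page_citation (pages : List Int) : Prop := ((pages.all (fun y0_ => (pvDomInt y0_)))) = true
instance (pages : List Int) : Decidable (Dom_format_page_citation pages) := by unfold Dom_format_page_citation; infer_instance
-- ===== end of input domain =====

-- B replaces A's stateful accumulator loop by a staged pipeline: break indices, then cut
-- points, then ranges by zipping consecutive cut points; objective: alternative (same O(n)).

-- ===== PORT A =====
-- the for-loop over pages[1:], state (ranges, start, end)
def fpcLoopA : List Int → List (Int × Int) → Int → Int → List (Int × Int) × Int × Int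
  | [], ranges, start, e => (ranges, start, e)
  | p :: rest, ranges, start, e =>
    if p = e + 1 then fpcLoopA rest ranges start p
    else fpcLoopA rest (ranges ++ [(start, e)]) p p

def format_page_citation (pages : List Int) : String :=
  match pages with
  | [] => "page unknown"
  | p0 :: rest =>
    let r := fpcLoopA rest [] p0 p0
    let ranges := r.1 ++ [(r.2.1, r.2.2)]
    let labels := ranges.map (fun rg =>
      if rg.1 ≠ rg.2 then PySem.Int.toStr rg.1 ++ "-" ++ PySem.Int.toStr rg.2
      else PySem.Int.toStr rg.1)
    let pre := if labels.length > 1 ∨ (ranges.headD (0, 0)).1 ≠ (ranges.headD (0, 0)).2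
               then "pp." else "p."
    pre ++ " " ++ PySem.Str.join ", " labels

-- ===== PORT B =====
-- [k for k in range(1, n) if pages[k] != pages[k-1] + 1]
-- (range(1, n) ported as List.range' 1 (n-1); the indices are always in 0..n-1, so
--  pages[k] is exact as getD with any default)
def fpcBreaks (pages : List Int) : List Nat :=
  (List.range' 1 (pages.length - 1)).filter
    (fun k => pages.getD k 0 ≠ pages.getD (k - 1) 0 + 1)

-- cuts = [0] + breaks + [n]
def fpcCuts (pages : List Int) : List Nat :=
  0 :: fpcBreaks pages ++ [pages.length]

-- [(pages[a], pages[b-1]) for a, b in zip(cuts, cuts[1:])]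
def fpcPairsG (pages : List Int) (cuts : List Nat) : List (Int × Int) :=
  (cuts.zip cuts.tail).map (fun ab => (pages.getD ab.1 0, pages.getD (ab.2 - 1) 0))

def fpcRangesB (pages : List Int) : List (Int × Int) :=
  fpcPairsG pages (fpcCuts pages)

def format_page_citation_alt (pages : List Int) : String :=
  match pages with
  | [] => "page unknown"
  | _ :: _ =>
    let ranges := fpcRangesB pages
    let labels := ranges.map (fun rg =>
      if rg.1 = rg.2 then PySem.Int.toStr rg.1
      else PySem.Int.toStr rg.1 ++ "-" ++ PySem.Int.toStr rg.2)
    let pre := if ranges.length = 1 ∧ (ranges.headD (0, 0)).1 = (ranges.headD (0, 0)).2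
               then "p." else "pp."
    pre ++ " " ++ PySem.Str.join ", " labels

-- ===== PRECONDITION & SPEC =====
def Spec_format_page_citation (pages : List Int) (out : String) : Prop := out = format_page_citation_alt pages
instance (pages : List Int) (out : String) : Decidable (Spec_format_page_citation pages out) := by unfold Spec_format_page_citation; infer_instance

-- ===== CLAIM (what is proved, stated in full; the proofs are below) =====
def Claim_equal_format_page_citation : Prop := ∀ (pages : List Int), Dom_format_page_citation pages → Spec_format_page_citation pages (format_page_citation pages)

-- ===== LEMMAS AND PROOFS =====

-- proof-level reference: the list of maximal runs, as plain structural recursion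
def fpcRuns (start last : Int) : List Int → List (Int × Int)
  | [] => [(start, last)]
  | p :: rest =>
    if p = last + 1 then fpcRuns start p rest
    else (start, last) :: fpcRuns p p rest

-- A's loop followed by the final append computes the runs, prefixed by the accumulator
theorem fpcLoopA_eq_runs (rest : List Int) :
    ∀ (ranges : List (Int × Int)) (start e : Int),
      (fpcLoopA rest ranges start e).1 ++
        [((fpcLoopA rest ranges start e).2.1, (fpcLoopA rest ranges start e).2.2)]
      = ranges ++ fpcRuns start e rest := by
  induction rest with
  | nil => intro ranges start e; simp [fpcLoopA, fpcRuns]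
  | cons p rest ih =>
    intro ranges start e
    by_cases h : p = e + 1
    · simp [fpcLoopA, fpcRuns, h, ih]
    · simp [fpcLoopA, fpcRuns, h, ih]

theorem fpcRuns_ne_nil (start last : Int) (rest : List Int) : fpcRuns start last rest ≠ [] := by
  induction rest generalizing start last with
  | nil => simp [fpcRuns]
  | cons p rest ih =>
    by_cases h : p = last + 1 <;> simp [fpcRuns, h, ih]

-- the start parameter only affects the first component of the head of fpcRuns
theorem fpcRuns_start (rest : List Int) :
    ∀ (l s t : Int),
      fpcRuns s l rest = (s, ((fpcRuns t l rest).headD (0, 0)).2) :: (fpcRuns t l rest).tail := by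
  induction rest with
  | nil => intro l s t; simp [fpcRuns]
  | cons p rest ih =>
    intro l s t
    by_cases h : p = l + 1
    · simp only [fpcRuns, if_pos h]; exact ih p s t
    · simp [fpcRuns, h]

-- every break index is ≥ 1
theorem fpcBreaks_pos (pages : List Int) : ∀ k ∈ fpcBreaks pages, 1 ≤ k := by
  intro k hk
  have := List.mem_filter.mp hk
  have := List.mem_range'_1.mp this.1
  omega

-- break indices of p :: tail: possibly 1, then the breaks of tail shifted by one
theorem fpcBreaks_cons (p q : Int) (rest : List Int) :
    fpcBreaks (p :: q :: rest)
      = (if q ≠ p + 1 then [1] else []) ++ (fpcBreaks (q :: rest)).map (· + 1) := by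
  unfold fpcBreaks
  have hlen : (p :: q :: rest).length - 1 = rest.length + 1 := by simp
  have hlen2 : (q :: rest).length - 1 = rest.length := by simp
  rw [hlen, hlen2, List.range'_succ]
  have hmap : List.range' 2 rest.length = (List.range' 1 rest.length).map (· + 1) := by
    have h1 := List.map_add_range' (a := 1) 1 rest.length 1
    rw [← h1]
    apply List.map_congr_left
    intro a _; omega
  rw [List.filter_cons, hmap, List.filter_map]
  have hcong : (List.range' 1 rest.length).filter
        ((fun k => decide ((p :: q :: rest).getD k 0 ≠ (p :: q :: rest).getD (k - 1) 0 + 1)) ∘ (· + 1))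
      = (List.range' 1 rest.length).filter
        (fun k => decide ((q :: rest).getD k 0 ≠ (q :: rest).getD (k - 1) 0 + 1)) := by
    apply List.filter_congr
    intro k hk
    have hk1 : 1 ≤ k := (List.mem_range'_1.mp hk).1
    obtain ⟨k', rfl⟩ : ∃ k', k = k' + 1 := ⟨k - 1, by omega⟩
    simp
  rw [hcong]
  by_cases h : q = p + 1 <;> simp [h]

-- getD on a cons at a positive index
theorem fpcGetD_cons_pos (x : Int) (xs : List Int) (k : Nat) (hk : 1 ≤ k) :
    (x :: xs).getD k 0 = xs.getD (k - 1) 0 := by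
  obtain ⟨k', rfl⟩ : ∃ k', k = k' + 1 := ⟨k - 1, by omega⟩
  simp

-- one step of the cut pairing
theorem fpcPairsG_cons (pages : List Int) (a c : Nat) (cs : List Nat) :
    fpcPairsG pages (a :: c :: cs)
      = (pages.getD a 0, pages.getD (c - 1) 0) :: fpcPairsG pages (c :: cs) := rfl

-- pairing after a uniform +1 shift of the cut list drops the head of the list
theorem fpcPairsG_shift (p : Int) (tail : List Int) :
    ∀ (cs : List Nat), (∀ b ∈ cs.tail, 1 ≤ b) →
      fpcPairsG (p :: tail) (cs.map (· + 1)) = fpcPairsG tail cs := by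
  intro cs
  induction cs with
  | nil => intro _; rfl
  | cons c cs ih =>
    intro h
    cases cs with
    | nil => rfl
    | cons c2 cs2 =>
      have h2 : 1 ≤ c2 := h c2 (by simp)
      have ih' := ih (fun b hb => h b (by simp at hb ⊢; tauto))
      simp only [List.map_cons] at ih' ⊢
      rw [fpcPairsG_cons, fpcPairsG_cons, ih']
      congr 1
      have e1 : 1 ≤ c + 1 := by omega
      rw [show c2 + 1 - 1 = c2 from rfl]
      rw [fpcGetD_cons_pos p tail (c + 1) e1, fpcGetD_cons_pos p tail c2 h2]
      simp

-- B's staged pipeline computes the runs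
theorem fpcRangesB_eq (rest : List Int) :
    ∀ (p : Int), fpcRangesB (p :: rest) = fpcRuns p p rest := by
  induction rest with
  | nil => intro p; rfl
  | cons q rest' ih =>
    intro p
    have hpos : ∀ b ∈ fpcBreaks (q :: rest') ++ [(q :: rest').length], 1 ≤ b := by
      intro b hb
      rcases List.mem_append.mp hb with hb | hb
      · exact fpcBreaks_pos _ b hb
      · simp at hb; simp [hb]
    have hcuts : fpcCuts (p :: q :: rest')
        = 0 :: ((if q ≠ p + 1 then [1] else [])
            ++ (fpcBreaks (q :: rest') ++ [(q :: rest').length]).map (· + 1)) := by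
      unfold fpcCuts
      rw [fpcBreaks_cons]
      simp [List.map_append]
    obtain ⟨c1, cs2, hcs⟩ : ∃ c1 cs2,
        fpcBreaks (q :: rest') ++ [(q :: rest').length] = c1 :: cs2 := by
      cases h : fpcBreaks (q :: rest') ++ [(q :: rest').length] with
      | nil => exact absurd h (by simp)
      | cons a l => exact ⟨a, l, rfl⟩
    have hc1 : 1 ≤ c1 := hpos c1 (by rw [hcs]; simp)
    have hcs2 : ∀ b ∈ cs2, 1 ≤ b := fun b hb => hpos b (by rw [hcs]; simp [hb])
    have hcutsT : fpcCuts (q :: rest') = 0 :: c1 :: cs2 := by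
      unfold fpcCuts
      rw [List.cons_append, hcs]
    have htail : fpcRangesB (q :: rest')
        = ((q :: rest').getD 0 0, (q :: rest').getD (c1 - 1) 0)
            :: fpcPairsG (q :: rest') (c1 :: cs2) := by
      rw [fpcRangesB, hcutsT, fpcPairsG_cons]
    by_cases hq : q = p + 1
    · -- no break between p and q: B glues; the head's start becomes p
      rw [fpcRangesB, hcuts, if_neg (by simpa using hq), List.nil_append, hcs, List.map_cons,
        fpcPairsG_cons, ← List.map_cons (f := (· + 1)) (a := c1) (l := cs2),
        fpcPairsG_shift p (q :: rest') (c1 :: cs2) (by simpa using hcs2)]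
      have hruns : fpcRuns q q rest'
          = (q, (q :: rest').getD (c1 - 1) 0) :: fpcPairsG (q :: rest') (c1 :: cs2) := by
        rw [← ih q, htail]; rfl
      rw [fpcRuns, if_pos hq, fpcRuns_start rest' q p q, hruns]
      simp only [List.headD_cons, List.tail_cons]
      rw [show c1 + 1 - 1 = c1 from rfl]
      rw [fpcGetD_cons_pos p (q :: rest') c1 hc1]
      simp
    · -- a break between p and q: B emits (p, p) and recurses
      rw [fpcRangesB, hcuts, if_pos hq, List.cons_append, List.nil_append, fpcPairsG_cons,
        show (1 : Nat) = 0 + 1 from rfl,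
        ← List.map_cons (f := (· + 1)) (a := 0) (l := fpcBreaks (q :: rest') ++ [(q :: rest').length]),
        fpcPairsG_shift p (q :: rest') _ (by intro b hb; exact hpos b (by simpa using hb))]
      have hB : fpcPairsG (q :: rest') (0 :: (fpcBreaks (q :: rest') ++ [(q :: rest').length]))
          = fpcRangesB (q :: rest') := by
        rw [fpcRangesB]
        unfold fpcCuts
        rw [List.cons_append]
      rw [hB, ih q, fpcRuns, if_neg hq]
      rfl

-- ===== VERDICT (by name: the statement is the Claim_ definition above) =====
theorem format_page_citation_spec : Claim_equal_format_page_citation := by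
  intro pages _
  unfold Spec_format_page_citation format_page_citation format_page_citation_alt
  cases pages with
  | nil => rfl
  | cons p0 rest =>
    simp only
    have hr := fpcLoopA_eq_runs rest [] p0 p0
    simp only [List.nil_append] at hr
    rw [hr, fpcRangesB_eq rest p0]
    have hne := fpcRuns_ne_nil p0 p0 rest
    have hlen : 1 ≤ (fpcRuns p0 p0 rest).length := by
      cases h : fpcRuns p0 p0 rest with
      | nil => exact absurd h hne
      | cons a l => simp
    congr 1
    · by_cases h1 : (fpcRuns p0 p0 rest).length = 1 ∧
          ((fpcRuns p0 p0 rest).headD (0, 0)).1 = ((fpcRuns p0 p0 rest).headD (0, 0)).2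
      · congr 1
        rw [if_pos h1, if_neg]
        simp only [List.length_map, gt_iff_lt, not_or, not_lt, not_not]
        exact ⟨by omega, h1.2⟩
      · congr 1
        rw [if_neg h1, if_pos]
        rw [Decidable.not_and_iff_or_not] at h1
        rcases h1 with h1 | h1
        · left; simp only [List.length_map, gt_iff_lt]; omega
        · right; exact h1
    · congr 1
      apply List.map_congr_left
      intro rg _
      by_cases h : rg.1 = rg.2 <;> simp [h]
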